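-- pv_equiv track=rewrite | github.com/majung2/CTpractice | python/2020하반기/2020쿠팡테크캠퍼스리쿠르팅/03.py | solution
-- ===== SOURCE A (Python) =====
-- def solution(k, score):
--     answer = -1
--     N = len(score) # 총 점수 갯수
--     sub = [0 for _ in range(N)]
--     sub_count = {}
--     remove = [False for _ in range(N)] # False: 조작x True: 조작o
--
--     for i in range(1,N):
--         sub[i] = score[i-1] - score[i]
--         if sub[i] not in sub_count:
--             sub_count[sub[i]] = 1
--         else:
--             sub_count[sub[i]] += 1
--
--     for i in range(1,N):
--         if sub_count[sub[i]] >= k: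
--             remove[i-1], remove[i] = True, True
--
--     answer = remove.count(False)
--
--     return answer
-- ===== SOURCE B (Python) =====
-- def solution(k, score):
--     # Run-length arithmetic: each maximal run of L consecutive "frequent"
--     # differences removes exactly L+1 scores, and distinct runs remove
--     # disjoint scores; so answer = N - (#frequent diffs) - (#runs).
--     diffs = [score[j] - score[j + 1] for j in range(len(score) - 1)]
--     cnt = {}
--     for d in diffs:
--         cnt[d] = cnt.get(d, 0) + 1
--     flags = [cnt[d] >= k for d in diffs]
--     trues = 0
--     runs = 0
--     prev = False
--     for v in flags:
--         if v:
--             trues += 1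
--             if not prev:
--                 runs += 1
--         prev = v
--     return len(score) - trues - runs
-- ===== Notes on version B (the rewrite author's own statement) =====
-- stated objective: alternative
-- what changed: A scatters removal marks into a boolean array (remove[i-1], remove[i] = True) and counts the unmarked cells; B never materialises any per-score marks: it computes the boolean frequency flags of the differences and uses run-length arithmetic -- each maximal run of L frequent differences removes exactly L+1 scores and distinct runs are disjoint -- so it returns N - (#frequent diffs) - (#maximal runs), counted in one accumulator pass.
import Mathlib
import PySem

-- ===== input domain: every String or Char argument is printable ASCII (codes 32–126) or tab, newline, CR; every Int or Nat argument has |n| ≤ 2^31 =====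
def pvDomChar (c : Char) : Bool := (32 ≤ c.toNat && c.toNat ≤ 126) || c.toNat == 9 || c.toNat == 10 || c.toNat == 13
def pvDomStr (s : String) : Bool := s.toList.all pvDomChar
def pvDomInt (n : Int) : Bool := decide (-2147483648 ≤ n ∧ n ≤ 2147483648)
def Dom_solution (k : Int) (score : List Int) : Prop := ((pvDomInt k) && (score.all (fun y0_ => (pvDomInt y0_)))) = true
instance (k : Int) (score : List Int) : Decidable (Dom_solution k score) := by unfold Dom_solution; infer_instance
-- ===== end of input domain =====

-- B replaces A's boolean-array scatter (marking remove[i-1], remove[i]) by run-length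
-- arithmetic over the frequency flags of the differences (N - #frequent - #runs);
-- objective: alternative algorithm, no per-score mark structure at all.

-- ===== PORT A =====
-- literal transliteration of A: zero-filled sub/remove arrays, a first index loop filling
-- sub and the sub_count dict, a second index loop scattering True marks, then remove.count(False).
-- (the dict access sub_count[sub[i]] in loop 2 is on a key inserted by loop 1, so getD is exact)
def solution (k : Int) (score : List Int) : Int :=
  let N : Int := (score.length : Int)
  let sub : List Int := (PySem.List.pyRange 0 N 1).map (fun _ => 0)
  let subCount : PySem.Dict Int Int := PySem.Dict.empty
  let remove : List Bool := (PySem.List.pyRange 0 N 1).map (fun _ => false)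
  let st := (PySem.List.pyRange 1 N 1).foldl
    (fun (st : List Int × PySem.Dict Int Int) i =>
      let sub' := PySem.List.pySetD st.1 i
        (PySem.List.pyGetD score (i - 1) 0 - PySem.List.pyGetD score i 0)
      let v := PySem.List.pyGetD sub' i 0
      let subCount' := match st.2.get? v with
        | none => st.2.insert v 1
        | some c => st.2.insert v (c + 1)
      (sub', subCount'))
    (sub, subCount)
  let removeF := (PySem.List.pyRange 1 N 1).foldl
    (fun r i =>
      if k ≤ st.2.getD (PySem.List.pyGetD st.1 i 0) 0 then
        PySem.List.pySetD (PySem.List.pySetD r (i - 1) true) i true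
      else r)
    remove
  (removeF.count false : Int)

-- ===== PORT B =====
-- literal transliteration of B (Source B): the difference list, its counting dict, the
-- boolean frequency flags, then one accumulator pass counting true flags and run
-- starts, returning len(score) - trues - runs.
def solution_alt (k : Int) (score : List Int) : Int :=
  let diffs : List Int := (PySem.List.pyRange 0 ((score.length : Int) - 1) 1).map
    (fun j => PySem.List.pyGetD score j 0 - PySem.List.pyGetD score (j + 1) 0)
  let cnt : PySem.Dict Int Int :=
    diffs.foldl (fun d x => d.insert x (d.getD x 0 + 1)) PySem.Dict.empty
  let flags : List Bool := diffs.map (fun d => decide (k ≤ cnt.getD d 0))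
  let st : Int × Int × Bool := flags.foldl
    (fun st v =>
      if v then (st.1 + 1, (if ¬ st.2.2 then st.2.1 + 1 else st.2.1), v)
      else (st.1, st.2.1, v))
    (0, 0, false)
  (score.length : Int) - st.1 - st.2.1

-- ===== PRECONDITION & SPEC =====
def Spec_solution (k : Int) (score : List Int) (out : Int) : Prop := out = solution_alt k score
instance (k : Int) (score : List Int) (out : Int) : Decidable (Spec_solution k score out) := by unfold Spec_solution; infer_instance

-- ===== CLAIM (what is proved, stated in full; the proofs are below) =====
def Claim_equal_solution : Prop := ∀ (k : Int) (score : List Int), Dom_solution k score → Spec_solution k score (solution k score)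

-- ===== LEMMAS AND PROOFS =====

-- the list of consecutive differences
def pvDiffs (score : List Int) : List Int := (score.zip score.tail).map (fun p => p.1 - p.2)

-- B's counter step
def pvStepC (d : PySem.Dict Int Int) (v : Int) : PySem.Dict Int Int := d.insert v (d.getD v 0 + 1)

-- 'the difference at index j occurs at least k times'
def pvHb (k : Int) (c : PySem.Dict Int Int) (ds : List Int) (j : Nat) : Bool :=
  decide (k ≤ c.getD (ds.getD j 0) 0)

-- state of A's remove array after processing loop indices i = 1..t
def pvMark (k : Int) (c : PySem.Dict Int Int) (ds : List Int) (t m : Nat) : Bool :=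
  (decide (1 ≤ m) && decide (m ≤ t) && pvHb k c ds (m - 1)) || (decide (m < t) && pvHb k c ds m)

-- mark at index m expressed through a flag list with boundary sentinel prev
def pvMkP (prev : Bool) (f : List Bool) (m : Nat) : Bool :=
  (if m = 0 then prev else f.getD (m - 1) false) || f.getD m false

-- the mark array as a scan over the flags (pairs of adjacent flags with false sentinels)
def pvMarks (prev : Bool) : List Bool → List Bool
  | [] => [prev]
  | c :: r => (prev || c) :: pvMarks c r

-- number of maximal runs of true flags, given the preceding flag
def pvRuns (prev : Bool) : List Bool → Nat
  | [] => 0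
  | c :: r => (if c && !prev then 1 else 0) + pvRuns c r

theorem pvDiffs_length (score : List Int) : (pvDiffs score).length = score.length - 1 := by
  simp [pvDiffs]

theorem pvDiffs_getD (score : List Int) (j : Nat) (h : j < score.length - 1) :
    (pvDiffs score).getD j 0 = score.getD j 0 - score.getD (j + 1) 0 := by
  have hl : (pvDiffs score).length = score.length - 1 := pvDiffs_length score
  rw [List.getD_eq_getElem _ _ (by omega), List.getD_eq_getElem _ _ (by omega),
      List.getD_eq_getElem _ _ (by omega)]
  simp only [pvDiffs, List.getElem_map, List.getElem_zip, List.getElem_tail]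

-- A's 'if not in: = 1 else: += 1' dict update is B's counter step
theorem pvMatchStep (d : PySem.Dict Int Int) (v : Int) :
    (match d.get? v with
      | none => d.insert v 1
      | some c => d.insert v (c + 1)) = pvStepC d v := by
  cases h : d.get? v with
  | none => simp [pvStepC, PySem.Dict.getD_eq_get?_getD, h]
  | some c => simp [pvStepC, PySem.Dict.getD_eq_get?_getD, h]

theorem pvSet_map_range (n j : Nat) (f : Nat → Bool) (v : Bool) :
    (((List.range n).map f).set j v) = (List.range n).map (fun m => if m = j then v else f m) := by
  apply List.ext_getElem (by simp)
  intro i h1 h2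
  rw [List.getElem_set]
  simp only [List.getElem_map, List.getElem_range]
  by_cases hij : j = i
  · subst hij; simp
  · rw [if_neg hij, if_neg (fun hh => hij hh.symm)]

-- invariant of A's first loop: sub is 0 followed by the first t differences (rest 0),
-- sub_count is the counter of the first t differences
theorem pvLoop1 (score : List Int) (h1 : 1 ≤ score.length) (t : Nat)
    (ht : t ≤ score.length - 1) :
    ((List.range t).foldl
      (fun (st : List Int × PySem.Dict Int Int) (j : Nat) =>
        (PySem.List.pySetD st.1 (1 + (j : Int))
            (PySem.List.pyGetD score ((1 + (j : Int)) - 1) 0 - PySem.List.pyGetD score (1 + (j : Int)) 0),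
         match st.2.get?
            (PySem.List.pyGetD (PySem.List.pySetD st.1 (1 + (j : Int))
              (PySem.List.pyGetD score ((1 + (j : Int)) - 1) 0 - PySem.List.pyGetD score (1 + (j : Int)) 0))
              (1 + (j : Int)) 0) with
          | none => st.2.insert
              (PySem.List.pyGetD (PySem.List.pySetD st.1 (1 + (j : Int))
                (PySem.List.pyGetD score ((1 + (j : Int)) - 1) 0 - PySem.List.pyGetD score (1 + (j : Int)) 0))
                (1 + (j : Int)) 0) 1
          | some c => st.2.insert
              (PySem.List.pyGetD (PySem.List.pySetD st.1 (1 + (j : Int))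
                (PySem.List.pyGetD score ((1 + (j : Int)) - 1) 0 - PySem.List.pyGetD score (1 + (j : Int)) 0))
                (1 + (j : Int)) 0) (c + 1)))
      (List.replicate score.length (0 : Int), PySem.Dict.empty))
    = (0 :: ((pvDiffs score).take t ++ List.replicate (score.length - 1 - t) 0),
       ((pvDiffs score).take t).foldl pvStepC PySem.Dict.empty) := by
  induction t with
  | zero =>
    simp only [List.range_zero, List.foldl_nil, List.take_zero, List.nil_append, Nat.sub_zero]
    rw [show score.length = (score.length - 1) + 1 from by omega]
    simp [List.replicate_succ]
  | succ t ih =>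
    have hl : (pvDiffs score).length = score.length - 1 := pvDiffs_length score
    have htake : ((pvDiffs score).take t).length = t := by simp; omega
    rw [List.range_succ, List.foldl_append, ih (by omega), List.foldl_cons, List.foldl_nil]
    have hc2 : ((1 : Int) + (t : Int)) - 1 = ((t : Nat) : Int) := by ring
    have hc1 : (1 : Int) + (t : Int) = ((t + 1 : Nat) : Int) := by omega
    have hc3 : (((t + 1 : Nat) : Int)) - 1 = ((t : Nat) : Int) := by omega
    simp only [hc1, hc3, PySem.List.pySetD_natCast, PySem.List.pyGetD_natCast]
    have hrep : List.replicate (score.length - 1 - t) (0:Int)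
        = 0 :: List.replicate (score.length - 1 - (t+1)) 0 := by
      rw [show score.length - 1 - t = (score.length - 1 - (t+1)) + 1 from by omega,
          List.replicate_succ]
    have hset : (0 :: ((pvDiffs score).take t ++ List.replicate (score.length - 1 - t) 0)).set (t+1)
        (score.getD t 0 - score.getD (t+1) 0)
        = 0 :: ((pvDiffs score).take (t+1) ++ List.replicate (score.length - 1 - (t+1)) 0) := by
      rw [List.set_cons_succ, hrep, List.set_append_right _ _ (by omega), htake]
      simp only [Nat.sub_self, List.set_cons_zero]
      rw [List.take_add_one, List.getElem?_eq_getElem (by omega),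
          ← List.getD_eq_getElem _ 0 (by omega), pvDiffs_getD score t (by omega)]
      simp
    rw [hset]
    have hread : (0 :: ((pvDiffs score).take (t+1) ++ List.replicate (score.length - 1 - (t+1)) 0)).getD (t+1) 0
        = score.getD t 0 - score.getD (t+1) 0 := by
      rw [List.getD_cons_succ, List.getD_eq_getElem _ _ (by simp; omega),
          List.getElem_append_left (by simp; omega)]
      rw [List.getElem_take, ← List.getD_eq_getElem _ 0 (by omega), pvDiffs_getD score t (by omega)]
    rw [hread, pvMatchStep]
    rw [List.take_add_one, List.getElem?_eq_getElem (by omega), List.foldl_append]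
    rw [← List.getD_eq_getElem _ 0 (by omega), pvDiffs_getD score t (by omega)]
    simp

-- invariant of A's second loop: after indices i = 1..t the remove array is pvMark · t
theorem pvLoop2 (k : Int) (c : PySem.Dict Int Int) (ds : List Int) (n : Nat) (t : Nat) :
    ((List.range t).foldl
      (fun (r : List Bool) (j : Nat) =>
        if k ≤ c.getD (PySem.List.pyGetD (0 :: ds) (1 + (j : Int)) 0) 0 then
          PySem.List.pySetD (PySem.List.pySetD r ((1 + (j : Int)) - 1) true) (1 + (j : Int)) true
        else r)
      (List.replicate n false))
    = (List.range n).map (pvMark k c ds t) := by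
  induction t with
  | zero =>
    simp only [List.range_zero, List.foldl_nil]
    have hz : ∀ m, pvMark k c ds 0 m = false := by
      intro m; cases m <;> simp [pvMark]
    rw [List.map_congr_left (fun m _ => hz m)]
    simp
  | succ t ih =>
    rw [List.range_succ, List.foldl_append, ih, List.foldl_cons, List.foldl_nil]
    have hc2 : ((1 : Int) + (t : Int)) - 1 = ((t : Nat) : Int) := by ring
    have hc1 : (1 : Int) + (t : Int) = ((t + 1 : Nat) : Int) := by omega
    have hread : PySem.List.pyGetD (0 :: ds) (1 + (t : Int)) 0 = ds.getD t 0 := by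
      rw [hc1, PySem.List.pyGetD_natCast, List.getD_cons_succ]
    rw [hread]
    by_cases hk : k ≤ c.getD (ds.getD t 0) 0
    · rw [if_pos hk]
      rw [hc2, hc1, PySem.List.pySetD_natCast, PySem.List.pySetD_natCast]
      rw [pvSet_map_range n t _ _, pvSet_map_range n (t+1) _ _]
      apply List.map_congr_left
      intro m hm
      have hbt : pvHb k c ds t = true := by unfold pvHb; exact decide_eq_true hk
      by_cases e1 : m = t + 1
      · subst e1; simp [pvMark, hbt]
      · by_cases e2 : m = t
        · subst e2; simp [pvMark, hbt]
        · rw [if_neg e1, if_neg e2]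
          simp only [pvMark]
          have d1 : decide (m ≤ t) = decide (m ≤ t + 1) := by
            by_cases hh : m ≤ t <;> simp [hh] <;> omega
          have d2 : decide (m < t) = decide (m < t + 1) := by
            by_cases hh : m < t <;> simp [hh] <;> omega
          rw [d1, d2]
    · rw [if_neg hk]
      apply List.map_congr_left
      intro m hm
      have hbt : pvHb k c ds t = false := by unfold pvHb; simpa using hk
      simp only [pvMark]
      by_cases e2 : m = t
      · subst e2; simp [hbt]
      · by_cases e1 : m = t + 1
        · subst e1; simp [hbt]
        · have d1 : decide (m ≤ t) = decide (m ≤ t + 1) := by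
            by_cases hh : m ≤ t <;> simp [hh] <;> omega
          have d2 : decide (m < t) = decide (m < t + 1) := by
            by_cases hh : m < t <;> simp [hh] <;> omega
          rw [d1, d2]


-- the canonical flag list: frequency flags of the differences
def pvFlags (k : Int) (score : List Int) : List Bool :=
  (List.range (pvDiffs score).length).map
    (pvHb k (List.foldl pvStepC PySem.Dict.empty (pvDiffs score)) (pvDiffs score))

theorem pvMarks_length (prev : Bool) (f : List Bool) : (pvMarks prev f).length = f.length + 1 := by
  induction f generalizing prev with
  | nil => rfl
  | cons c r ih => simp [pvMarks, ih]

-- true marks = true flags + run starts (+ the sentinel)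
theorem pvMarks_count_true (prev : Bool) (f : List Bool) :
    (pvMarks prev f).count true = f.count true + pvRuns prev f + (if prev then 1 else 0) := by
  induction f generalizing prev with
  | nil => cases prev <;> simp [pvMarks, pvRuns]
  | cons c r ih =>
    simp only [pvMarks, pvRuns, List.count_cons, ih c]
    cases prev <;> cases c <;> simp <;> omega

theorem pvCount_false_true (l : List Bool) : l.count false + l.count true = l.length := by
  induction l with
  | nil => rfl
  | cons c r ih => cases c <;> simp <;> omega

theorem pvMkP_succ (prev c : Bool) (r : List Bool) (m : Nat) :
    pvMkP prev (c :: r) (m + 1) = pvMkP c r m := by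
  cases m <;> simp [pvMkP]

-- the marks array is the per-index gather pvMkP over the range
theorem pvRange_marks (f : List Bool) (prev : Bool) :
    (List.range (f.length + 1)).map (pvMkP prev f) = pvMarks prev f := by
  induction f generalizing prev with
  | nil => simp [pvMkP, pvMarks, List.range_succ]
  | cons c r ih =>
    rw [List.length_cons, List.range_succ_eq_map, List.map_cons, List.map_map]
    have h0 : pvMkP prev (c :: r) 0 = (prev || c) := rfl
    have hcomp : (pvMkP prev (c :: r)) ∘ Nat.succ = pvMkP c r := by
      funext m; exact pvMkP_succ prev c r m
    rw [h0, hcomp, ih c]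
    rfl

-- the getD of a flag list built from range
theorem pvFlagGetD (L : Nat) (g : Nat → Bool) (j : Nat) :
    ((List.range L).map g).getD j false = if j < L then g j else false := by
  by_cases h : j < L
  · rw [if_pos h, List.getD_eq_getElem _ _ (by simpa using h)]
    simp
  · rw [if_neg h, List.getD_eq_default _ _ (by simpa using Nat.le_of_not_lt h)]

-- A's final mark at m is the adjacent-flags gather
theorem pvMark_eq_mkP (k : Int) (c : PySem.Dict Int Int) (ds : List Int) (m : Nat)
    (hm : m < ds.length + 1) :
    pvMark k c ds ds.length m = pvMkP false ((List.range ds.length).map (pvHb k c ds)) m := by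
  simp only [pvMark, pvMkP, pvFlagGetD]
  cases m with
  | zero => simp
  | succ s =>
    have h1 : (1 ≤ s + 1) := by omega
    have h2 : (s + 1 ≤ ds.length) := by omega
    have h3 : s < ds.length := by omega
    simp only [if_neg (Nat.succ_ne_zero s), Nat.add_sub_cancel, if_pos h3,
      decide_eq_true h1, decide_eq_true h2, Bool.true_and]
    by_cases h4 : s + 1 < ds.length
    · simp [h4]
    · simp [h4]

-- B's accumulator step (named for the proofs; identical to the lambda in the port)
def pvStepB (st : Int × Int × Bool) (v : Bool) : Int × Int × Bool :=
  if v then (st.1 + 1, (if ¬ st.2.2 then st.2.1 + 1 else st.2.1), v)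
  else (st.1, st.2.1, v)

-- invariant of B's accumulator loop: first component counts true flags, second the runs
theorem pvFoldB (f : List Bool) (t r : Int) (prev : Bool) :
    (f.foldl pvStepB (t, r, prev)).1 = t + (f.count true : Int) ∧
    (f.foldl pvStepB (t, r, prev)).2.1 = r + (pvRuns prev f : Int) := by
  induction f generalizing t r prev with
  | nil => simp
  | cons c rest ih =>
    cases c with
    | false =>
      obtain ⟨ih1, ih2⟩ := ih t r false
      refine ⟨?_, ?_⟩
      · rw [List.foldl_cons, show pvStepB (t, r, prev) false = (t, r, false) from rfl, ih1]
        simp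
      · rw [List.foldl_cons, show pvStepB (t, r, prev) false = (t, r, false) from rfl, ih2]
        simp [pvRuns]
    | true =>
      cases prev with
      | false =>
        obtain ⟨ih1, ih2⟩ := ih (t + 1) (r + 1) true
        refine ⟨?_, ?_⟩
        · rw [List.foldl_cons, show pvStepB (t, r, false) true = (t + 1, r + 1, true) from rfl, ih1]
          simp
          omega
        · rw [List.foldl_cons, show pvStepB (t, r, false) true = (t + 1, r + 1, true) from rfl, ih2]
          simp [pvRuns]
          omega
      | true =>
        obtain ⟨ih1, ih2⟩ := ih (t + 1) r true
        refine ⟨?_, ?_⟩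
        · rw [List.foldl_cons, show pvStepB (t, r, true) true = (t + 1, r, true) from rfl, ih1]
          simp
          omega
        · rw [List.foldl_cons, show pvStepB (t, r, true) true = (t + 1, r, true) from rfl, ih2]
          simp [pvRuns]

-- a map over a list is the gather over its index range
theorem pvMap_range_getD (ds : List Int) (g : Int → Bool) :
    ds.map g = (List.range ds.length).map (fun j => g (ds.getD j 0)) := by
  apply List.ext_getElem (by simp)
  intro i h1 h2
  have hi : i < ds.length := by simpa using h1
  simp only [List.getElem_map, List.getElem_range]
  rw [List.getD_eq_getElem ds 0 hi]

-- B's diff list is pvDiffs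
theorem pvDiffsB (score : List Int) (h1 : 1 ≤ score.length) :
    (PySem.List.pyRange 0 ((score.length : Int) - 1) 1).map
      (fun j => PySem.List.pyGetD score j 0 - PySem.List.pyGetD score (j + 1) 0)
    = pvDiffs score := by
  rw [show ((score.length : Int) - 1) = (((score.length - 1 : Nat)) : Int) from by omega,
    PySem.List.pyRange_zero_nat, List.map_map]
  apply List.ext_getElem (by simp [pvDiffs_length])
  intro i hl1 hl2
  have hi : i < score.length - 1 := by simpa using hl1
  simp only [List.getElem_map, List.getElem_range, Function.comp]
  rw [show ((i : Int) + 1) = (((i + 1 : Nat)) : Int) from by push_cast; ring]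
  rw [PySem.List.pyGetD_natCast, PySem.List.pyGetD_natCast]
  rw [← List.getD_eq_getElem _ 0 (by simpa [pvDiffs_length] using hl2), pvDiffs_getD score i hi]

-- B computes N - #true flags - #runs
theorem pvAltEq (k : Int) (score : List Int) (h1 : 1 ≤ score.length) :
    solution_alt k score
    = (score.length : Int) - ((pvFlags k score).count true : Int)
        - (pvRuns false (pvFlags k score) : Int) := by
  have hflags : (pvDiffs score).map
      (fun d => decide (k ≤ (List.foldl pvStepC PySem.Dict.empty (pvDiffs score)).getD d 0))
      = pvFlags k score := by
    rw [pvMap_range_getD]; rfl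
  simp only [solution_alt]
  rw [pvDiffsB score h1,
    show (fun (d : PySem.Dict Int Int) (x : Int) => d.insert x (d.getD x 0 + 1)) = pvStepC from rfl,
    hflags,
    show (fun (st : Int × Int × Bool) v =>
        if v then (st.1 + 1, (if ¬ st.2.2 then st.2.1 + 1 else st.2.1), v)
        else (st.1, st.2.1, v)) = pvStepB from rfl,
    (pvFoldB (pvFlags k score) 0 0 false).1, (pvFoldB (pvFlags k score) 0 0 false).2]
  ring

-- A computes the count of unmarked cells, and the mark array is pvMarks over the flags
theorem pvAEq (k : Int) (score : List Int) (h1 : 1 ≤ score.length) :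
    solution k score = (((pvMarks false (pvFlags k score)).count false : Nat) : Int) := by
  have hcast : (((score.length : Int)) - 1).toNat = score.length - 1 := by omega
  have e0 : (PySem.List.pyRange 0 ((score.length : Int)) 1).map (fun _ => (0 : Int))
      = List.replicate score.length 0 := by
    simp [PySem.List.pyRange_zero_nat, List.eq_replicate_iff]
  have e0' : (PySem.List.pyRange 0 ((score.length : Int)) 1).map (fun _ => false)
      = List.replicate score.length false := by
    simp [PySem.List.pyRange_zero_nat]
  have hrange1 : PySem.List.pyRange 1 ((score.length : Int)) 1
      = (List.range (score.length - 1)).map (fun (j : Nat) => 1 + (j : Int)) := by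
    rw [PySem.List.pyRange_one, hcast]
  simp only [solution, e0, e0', hrange1, List.foldl_map]
  rw [pvLoop1 score h1 (score.length - 1) le_rfl]
  simp only [show score.length - 1 = (pvDiffs score).length from (pvDiffs_length score).symm,
    List.take_length, Nat.sub_self, List.replicate_zero, List.append_nil]
  rw [pvLoop2 k ((pvDiffs score).foldl pvStepC PySem.Dict.empty) (pvDiffs score) score.length
      ((pvDiffs score).length)]
  have hfl : (pvFlags k score).length = (pvDiffs score).length := by simp [pvFlags]
  have hlen : score.length = (pvFlags k score).length + 1 := by
    rw [hfl, pvDiffs_length]; omega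
  have hmap : (List.range score.length).map
      (pvMark k (List.foldl pvStepC PySem.Dict.empty (pvDiffs score)) (pvDiffs score)
        (pvDiffs score).length)
      = pvMarks false (pvFlags k score) := by
    rw [hlen, ← pvRange_marks (pvFlags k score) false]
    apply List.map_congr_left
    intro m hm
    rw [List.mem_range] at hm
    exact pvMark_eq_mkP k _ (pvDiffs score) m (by omega)
  rw [hmap]

-- ===== VERDICT (by name: the statement is the Claim_ definition above) =====
theorem solution_spec : Claim_equal_solution := by
  intro k score _
  unfold Spec_solution
  by_cases h0 : score.length = 0
  · have : score = [] := List.eq_nil_of_length_eq_zero h0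
    subst this
    rfl
  · have h1 : 1 ≤ score.length := by omega
    rw [pvAEq k score h1, pvAltEq k score h1]
    have hct := pvMarks_count_true false (pvFlags k score)
    have hcf := pvCount_false_true (pvMarks false (pvFlags k score))
    have hml := pvMarks_length false (pvFlags k score)
    have hfl : (pvFlags k score).length = score.length - 1 := by
      simp [pvFlags, pvDiffs_length]
    simp only [Bool.false_eq_true, if_false] at hct
    omega
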